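-- pv_equiv track=rewrite | github.com/HaichaoLiang/WhatToPlay-Context-Aware-Game-Recommender | backend/app/routes/public_recommendations.py | get_intensity_by_genre
-- ===== SOURCE A (Python) =====
-- def get_intensity_by_genre(genre: str = "") -> int:
--     key = genre.lower()
--     if any(x in key for x in ("horror", "battle", "moba")):
--         return 3
--     if any(x in key for x in ("shooter", "action", "sports")):
--         return 2
--     if any(x in key for x in ("puzzle", "adventure", "rpg")):
--         return 1
--     if any(x in key for x in ("sandbox", "simulation", "casual")):
--         return 0
--     return 1
-- ===== SOURCE B (Python) =====
-- INTENSITY_TABLE = [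
--     ("horror", 3), ("battle", 3), ("moba", 3),
--     ("shooter", 2), ("action", 2), ("sports", 2),
--     ("puzzle", 1), ("adventure", 1), ("rpg", 1),
--     ("sandbox", 0), ("simulation", 0), ("casual", 0),
-- ]
--
-- def get_intensity_by_genre(genre: str = "") -> int:
--     key = genre.lower()
--     return max((v for k, v in INTENSITY_TABLE if k in key), default=1)
-- ===== Notes on version B (the rewrite author's own statement) =====
-- stated objective: simpler
-- what changed: Replaced the four-branch short-circuit cascade by a single keyword->intensity table and one max-reduction over all matching keywords (default 1), which is correct because the cascade's priority order coincides with descending intensity.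
import Mathlib
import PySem

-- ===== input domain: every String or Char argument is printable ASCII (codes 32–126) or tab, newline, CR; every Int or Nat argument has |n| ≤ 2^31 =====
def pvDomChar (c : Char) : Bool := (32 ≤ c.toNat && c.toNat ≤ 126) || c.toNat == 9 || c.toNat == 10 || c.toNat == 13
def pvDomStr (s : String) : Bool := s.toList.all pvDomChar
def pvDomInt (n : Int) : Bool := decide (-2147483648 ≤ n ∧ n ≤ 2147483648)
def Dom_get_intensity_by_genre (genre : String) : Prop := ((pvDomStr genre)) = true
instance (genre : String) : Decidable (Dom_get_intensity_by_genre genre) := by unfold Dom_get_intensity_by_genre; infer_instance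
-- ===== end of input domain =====

-- B replaces A's ordered branch cascade by a keyword→intensity table plus one max-reduction (objective: simpler).

-- ===== PORT A =====
def get_intensity_by_genre (genre : String) : Int :=
  let key := PySem.Str.lower genre
  if ["horror", "battle", "moba"].any (fun x => PySem.Str.isIn x key) then 3
  else if ["shooter", "action", "sports"].any (fun x => PySem.Str.isIn x key) then 2
  else if ["puzzle", "adventure", "rpg"].any (fun x => PySem.Str.isIn x key) then 1
  else if ["sandbox", "simulation", "casual"].any (fun x => PySem.Str.isIn x key) then 0
  else 1

-- ===== PORT B =====
def INTENSITY_TABLE : List (String × Int) :=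
  [("horror", 3), ("battle", 3), ("moba", 3),
   ("shooter", 2), ("action", 2), ("sports", 2),
   ("puzzle", 1), ("adventure", 1), ("rpg", 1),
   ("sandbox", 0), ("simulation", 0), ("casual", 0)]

def get_intensity_by_genre_alt (genre : String) : Int :=
  let key := PySem.Str.lower genre
  let hits := INTENSITY_TABLE.filterMap (fun p => if PySem.Str.isIn p.1 key then some p.2 else none)
  match hits with
  | [] => 1                      -- max(..., default=1)
  | h :: t => t.foldl max h      -- max over the matched intensities

-- ===== PRECONDITION & SPEC =====
def Spec_get_intensity_by_genre (genre : String) (out : Int) : Prop := out = get_intensity_by_genre_alt genre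
instance (genre : String) (out : Int) : Decidable (Spec_get_intensity_by_genre genre out) := by unfold Spec_get_intensity_by_genre; infer_instance

-- ===== CLAIM (what is proved, stated in full; the proofs are below) =====
def Claim_equal_get_intensity_by_genre : Prop := ∀ (genre : String), Dom_get_intensity_by_genre genre → Spec_get_intensity_by_genre genre (get_intensity_by_genre genre)

-- ===== LEMMAS AND PROOFS =====

-- A's cascade as a function of the 12 substring tests (in A's order)
def pvFormA (b1 b2 b3 b4 b5 b6 b7 b8 b9 b10 b11 b12 : Bool) : Int :=
  if b1 || (b2 || (b3 || false)) then 3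
  else if b4 || (b5 || (b6 || false)) then 2
  else if b7 || (b8 || (b9 || false)) then 1
  else if b10 || (b11 || (b12 || false)) then 0
  else 1

-- B's table-and-max as a function of the same 12 substring tests
def pvFormB (b1 b2 b3 b4 b5 b6 b7 b8 b9 b10 b11 b12 : Bool) : Int :=
  let hits := List.filterMap (fun p : Bool × Int => if p.1 then some p.2 else none)
    [(b1, 3), (b2, 3), (b3, 3), (b4, 2), (b5, 2), (b6, 2),
     (b7, 1), (b8, 1), (b9, 1), (b10, 0), (b11, 0), (b12, 0)]
  match hits with
  | [] => 1
  | h :: t => t.foldl max h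

set_option maxHeartbeats 4000000 in
theorem pvForms_eq : ∀ b1 b2 b3 b4 b5 b6 b7 b8 b9 b10 b11 b12,
    pvFormA b1 b2 b3 b4 b5 b6 b7 b8 b9 b10 b11 b12 = pvFormB b1 b2 b3 b4 b5 b6 b7 b8 b9 b10 b11 b12 := by
  decide

-- ===== VERDICT (by name: the statement is the Claim_ definition above) =====
set_option maxHeartbeats 4000000 in
theorem get_intensity_by_genre_spec : Claim_equal_get_intensity_by_genre := by
  intro genre _
  unfold Spec_get_intensity_by_genre
  have hA : get_intensity_by_genre genre =
      pvFormA (PySem.Str.isIn "horror" (PySem.Str.lower genre)) (PySem.Str.isIn "battle" (PySem.Str.lower genre))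
        (PySem.Str.isIn "moba" (PySem.Str.lower genre)) (PySem.Str.isIn "shooter" (PySem.Str.lower genre))
        (PySem.Str.isIn "action" (PySem.Str.lower genre)) (PySem.Str.isIn "sports" (PySem.Str.lower genre))
        (PySem.Str.isIn "puzzle" (PySem.Str.lower genre)) (PySem.Str.isIn "adventure" (PySem.Str.lower genre))
        (PySem.Str.isIn "rpg" (PySem.Str.lower genre)) (PySem.Str.isIn "sandbox" (PySem.Str.lower genre))
        (PySem.Str.isIn "simulation" (PySem.Str.lower genre)) (PySem.Str.isIn "casual" (PySem.Str.lower genre)) := rfl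
  have hB : get_intensity_by_genre_alt genre =
      pvFormB (PySem.Str.isIn "horror" (PySem.Str.lower genre)) (PySem.Str.isIn "battle" (PySem.Str.lower genre))
        (PySem.Str.isIn "moba" (PySem.Str.lower genre)) (PySem.Str.isIn "shooter" (PySem.Str.lower genre))
        (PySem.Str.isIn "action" (PySem.Str.lower genre)) (PySem.Str.isIn "sports" (PySem.Str.lower genre))
        (PySem.Str.isIn "puzzle" (PySem.Str.lower genre)) (PySem.Str.isIn "adventure" (PySem.Str.lower genre))
        (PySem.Str.isIn "rpg" (PySem.Str.lower genre)) (PySem.Str.isIn "sandbox" (PySem.Str.lower genre))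
        (PySem.Str.isIn "simulation" (PySem.Str.lower genre)) (PySem.Str.isIn "casual" (PySem.Str.lower genre)) := rfl
  rw [hA, hB]
  exact pvForms_eq _ _ _ _ _ _ _ _ _ _ _ _
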